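-- pv_equiv track=rewrite | github.com/hojmax/tetris-mcts | tetris_mcts/scripts/count_reachable_states.py | get_cells
-- ===== SOURCE A (Python) =====
-- TETROMINOS = [
--     # I piece - index 0
--     [
--         [[0, 0, 0, 0], [1, 1, 1, 1], [0, 0, 0, 0], [0, 0, 0, 0]],  # rot 0
--         [[0, 0, 1, 0], [0, 0, 1, 0], [0, 0, 1, 0], [0, 0, 1, 0]],  # rot 1
--         [[0, 0, 0, 0], [0, 0, 0, 0], [1, 1, 1, 1], [0, 0, 0, 0]],  # rot 2
--         [[0, 1, 0, 0], [0, 1, 0, 0], [0, 1, 0, 0], [0, 1, 0, 0]],  # rot 3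
--     ],
--     # O piece - index 1
--     [
--         [[0, 0, 0, 0], [0, 1, 1, 0], [0, 1, 1, 0], [0, 0, 0, 0]],
--         [[0, 0, 0, 0], [0, 1, 1, 0], [0, 1, 1, 0], [0, 0, 0, 0]],
--         [[0, 0, 0, 0], [0, 1, 1, 0], [0, 1, 1, 0], [0, 0, 0, 0]],
--         [[0, 0, 0, 0], [0, 1, 1, 0], [0, 1, 1, 0], [0, 0, 0, 0]],
--     ],
--     # T piece - index 2
--     [
--         [[0, 1, 0, 0], [1, 1, 1, 0], [0, 0, 0, 0], [0, 0, 0, 0]],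
--         [[0, 1, 0, 0], [0, 1, 1, 0], [0, 1, 0, 0], [0, 0, 0, 0]],
--         [[0, 0, 0, 0], [1, 1, 1, 0], [0, 1, 0, 0], [0, 0, 0, 0]],
--         [[0, 1, 0, 0], [1, 1, 0, 0], [0, 1, 0, 0], [0, 0, 0, 0]],
--     ],
--     # S piece - index 3
--     [
--         [[0, 1, 1, 0], [1, 1, 0, 0], [0, 0, 0, 0], [0, 0, 0, 0]],
--         [[0, 1, 0, 0], [0, 1, 1, 0], [0, 0, 1, 0], [0, 0, 0, 0]],
--         [[0, 0, 0, 0], [0, 1, 1, 0], [1, 1, 0, 0], [0, 0, 0, 0]],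
--         [[1, 0, 0, 0], [1, 1, 0, 0], [0, 1, 0, 0], [0, 0, 0, 0]],
--     ],
--     # Z piece - index 4
--     [
--         [[1, 1, 0, 0], [0, 1, 1, 0], [0, 0, 0, 0], [0, 0, 0, 0]],
--         [[0, 0, 1, 0], [0, 1, 1, 0], [0, 1, 0, 0], [0, 0, 0, 0]],
--         [[0, 0, 0, 0], [1, 1, 0, 0], [0, 1, 1, 0], [0, 0, 0, 0]],
--         [[0, 1, 0, 0], [1, 1, 0, 0], [1, 0, 0, 0], [0, 0, 0, 0]],
--     ],
--     # J piece - index 5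
--     [
--         [[1, 0, 0, 0], [1, 1, 1, 0], [0, 0, 0, 0], [0, 0, 0, 0]],
--         [[0, 1, 1, 0], [0, 1, 0, 0], [0, 1, 0, 0], [0, 0, 0, 0]],
--         [[0, 0, 0, 0], [1, 1, 1, 0], [0, 0, 1, 0], [0, 0, 0, 0]],
--         [[0, 1, 0, 0], [0, 1, 0, 0], [1, 1, 0, 0], [0, 0, 0, 0]],
--     ],
--     # L piece - index 6
--     [
--         [[0, 0, 1, 0], [1, 1, 1, 0], [0, 0, 0, 0], [0, 0, 0, 0]],
--         [[0, 1, 0, 0], [0, 1, 0, 0], [0, 1, 1, 0], [0, 0, 0, 0]],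
--         [[0, 0, 0, 0], [1, 1, 1, 0], [1, 0, 0, 0], [0, 0, 0, 0]],
--         [[1, 1, 0, 0], [0, 1, 0, 0], [0, 1, 0, 0], [0, 0, 0, 0]],
--     ],
-- ]
--
-- def get_cells(piece_type, rotation, x, y):
--     """Get the cells occupied by a piece at position (x, y) with given rotation."""
--     shape = TETROMINOS[piece_type][rotation]
--     cells = []
--     for dy in range(4):
--         for dx in range(4):
--             if shape[dy][dx] == 1:
--                 cells.append((x + dx, y + dy))
--     return cells
-- ===== SOURCE B (Python) =====
-- """Occupied-cell offsets precomputed once per (piece_type, rotation); the function is a single list comprehension, no 4x4 scan per call."""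
--
-- OFFSETS = [[[(0, 1), (1, 1), (2, 1), (3, 1)], [(2, 0), (2, 1), (2, 2), (2, 3)], [(0, 2), (1, 2), (2, 2), (3, 2)], [(1, 0), (1, 1), (1, 2), (1, 3)]], [[(1, 1), (2, 1), (1, 2), (2, 2)], [(1, 1), (2, 1), (1, 2), (2, 2)], [(1, 1), (2, 1), (1, 2), (2, 2)], [(1, 1), (2, 1), (1, 2), (2, 2)]], [[(1, 0), (0, 1), (1, 1), (2, 1)], [(1, 0), (1, 1), (2, 1), (1, 2)], [(0, 1), (1, 1), (2, 1), (1, 2)], [(1, 0), (0, 1), (1, 1), (1, 2)]], [[(1, 0), (2, 0), (0, 1), (1, 1)], [(1, 0), (1, 1), (2, 1), (2, 2)], [(1, 1), (2, 1), (0, 2), (1, 2)], [(0, 0), (0, 1), (1, 1), (1, 2)]], [[(0, 0), (1, 0), (1, 1), (2, 1)], [(2, 0), (1, 1), (2, 1), (1, 2)], [(0, 1), (1, 1), (1, 2), (2, 2)], [(1, 0), (0, 1), (1, 1), (0, 2)]], [[(0, 0), (0, 1), (1, 1), (2, 1)], [(1, 0), (2, 0), (1, 1), (1, 2)], [(0,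 1), (1, 1), (2, 1), (2, 2)], [(1, 0), (1, 1), (0, 2), (1, 2)]], [[(2, 0), (0, 1), (1, 1), (2, 1)], [(1, 0), (1, 1), (1, 2), (2, 2)], [(0, 1), (1, 1), (2, 1), (0, 2)], [(0, 0), (1, 0), (1, 1), (1, 2)]]]
--
-- def get_cells(piece_type, rotation, x, y):
--     """Get the cells occupied by a piece at position (x, y) with given rotation."""
--     return [(x + dx, y + dy) for dx, dy in OFFSETS[piece_type][rotation]]
-- ===== Notes on version B (the rewrite author's own statement) =====
-- stated objective: simpler
-- what changed: Replaces the per-call 4x4 grid scan with a module-level precomputed OFFSETS[piece_type][rotation] table of (dx,dy) pairs (built once in the same dy-major order), so the function is a single list comprehension adding offsets.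
import Mathlib
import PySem

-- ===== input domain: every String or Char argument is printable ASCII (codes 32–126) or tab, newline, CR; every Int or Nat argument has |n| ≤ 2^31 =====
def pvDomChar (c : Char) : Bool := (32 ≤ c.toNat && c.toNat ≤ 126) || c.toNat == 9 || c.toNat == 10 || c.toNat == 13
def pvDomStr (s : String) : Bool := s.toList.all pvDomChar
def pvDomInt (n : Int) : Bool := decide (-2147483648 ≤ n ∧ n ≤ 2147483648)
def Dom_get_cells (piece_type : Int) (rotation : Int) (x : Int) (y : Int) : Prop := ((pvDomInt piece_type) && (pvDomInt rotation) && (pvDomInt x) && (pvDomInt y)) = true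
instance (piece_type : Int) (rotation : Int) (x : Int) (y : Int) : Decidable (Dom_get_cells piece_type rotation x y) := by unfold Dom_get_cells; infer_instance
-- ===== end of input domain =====

-- B replaces the per-call 4x4 grid scan with a precomputed offsets table; one map per call.

-- ===== PORT A =====
def TETROMINOS : List (List (List (List Int))) :=
[[[[0,0,0,0], [1,1,1,1], [0,0,0,0], [0,0,0,0]],
  [[0,0,1,0], [0,0,1,0], [0,0,1,0], [0,0,1,0]],
  [[0,0,0,0], [0,0,0,0], [1,1,1,1], [0,0,0,0]],
  [[0,1,0,0], [0,1,0,0], [0,1,0,0], [0,1,0,0]]],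
 [[[0,0,0,0], [0,1,1,0], [0,1,1,0], [0,0,0,0]],
  [[0,0,0,0], [0,1,1,0], [0,1,1,0], [0,0,0,0]],
  [[0,0,0,0], [0,1,1,0], [0,1,1,0], [0,0,0,0]],
  [[0,0,0,0], [0,1,1,0], [0,1,1,0], [0,0,0,0]]],
 [[[0,1,0,0], [1,1,1,0], [0,0,0,0], [0,0,0,0]],
  [[0,1,0,0], [0,1,1,0], [0,1,0,0], [0,0,0,0]],
  [[0,0,0,0], [1,1,1,0], [0,1,0,0], [0,0,0,0]],
  [[0,1,0,0], [1,1,0,0], [0,1,0,0], [0,0,0,0]]],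
 [[[0,1,1,0], [1,1,0,0], [0,0,0,0], [0,0,0,0]],
  [[0,1,0,0], [0,1,1,0], [0,0,1,0], [0,0,0,0]],
  [[0,0,0,0], [0,1,1,0], [1,1,0,0], [0,0,0,0]],
  [[1,0,0,0], [1,1,0,0], [0,1,0,0], [0,0,0,0]]],
 [[[1,1,0,0], [0,1,1,0], [0,0,0,0], [0,0,0,0]],
  [[0,0,1,0], [0,1,1,0], [0,1,0,0], [0,0,0,0]],
  [[0,0,0,0], [1,1,0,0], [0,1,1,0], [0,0,0,0]],
  [[0,1,0,0], [1,1,0,0], [1,0,0,0], [0,0,0,0]]],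
 [[[1,0,0,0], [1,1,1,0], [0,0,0,0], [0,0,0,0]],
  [[0,1,1,0], [0,1,0,0], [0,1,0,0], [0,0,0,0]],
  [[0,0,0,0], [1,1,1,0], [0,0,1,0], [0,0,0,0]],
  [[0,1,0,0], [0,1,0,0], [1,1,0,0], [0,0,0,0]]],
 [[[0,0,1,0], [1,1,1,0], [0,0,0,0], [0,0,0,0]],
  [[0,1,0,0], [0,1,0,0], [0,1,1,0], [0,0,0,0]],
  [[0,0,0,0], [1,1,1,0], [1,0,0,0], [0,0,0,0]],
  [[1,1,0,0], [0,1,0,0], [0,1,0,0], [0,0,0,0]]]]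

-- literal transliteration of A: index TETROMINOS[piece_type][rotation] (Python indexing,
-- so negative indices wrap; `none` = IndexError, excluded by Pre_), then scan dy,dx in 0..3.
def get_cells (piece_type : Int) (rotation : Int) (x : Int) (y : Int) : List (Int × Int) :=
  match PySem.List.pyGet? TETROMINOS piece_type with
  | none => []
  | some rots =>
    match PySem.List.pyGet? rots rotation with
    | none => []
    | some shape =>
      (PySem.List.pyRange 0 4 1).foldl (fun cells dy =>
        (PySem.List.pyRange 0 4 1).foldl (fun cells dx =>
          -- shape[dy][dx]: dy,dx ∈ [0,4) are always in range for a 4x4 shape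
          if ((PySem.List.pyGet? shape dy).bind (fun row => PySem.List.pyGet? row dx)) == some 1
          then cells ++ [(x + dx, y + dy)] else cells) cells) []

-- ===== PORT B =====
def OFFSETS : List (List (List (Int × Int))) :=
[[[(0,1),(1,1),(2,1),(3,1)], [(2,0),(2,1),(2,2),(2,3)], [(0,2),(1,2),(2,2),(3,2)], [(1,0),(1,1),(1,2),(1,3)]],
 [[(1,1),(2,1),(1,2),(2,2)], [(1,1),(2,1),(1,2),(2,2)], [(1,1),(2,1),(1,2),(2,2)], [(1,1),(2,1),(1,2),(2,2)]],
 [[(1,0),(0,1),(1,1),(2,1)], [(1,0),(1,1),(2,1),(1,2)], [(0,1),(1,1),(2,1),(1,2)], [(1,0),(0,1),(1,1),(1,2)]],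
 [[(1,0),(2,0),(0,1),(1,1)], [(1,0),(1,1),(2,1),(2,2)], [(1,1),(2,1),(0,2),(1,2)], [(0,0),(0,1),(1,1),(1,2)]],
 [[(0,0),(1,0),(1,1),(2,1)], [(2,0),(1,1),(2,1),(1,2)], [(0,1),(1,1),(1,2),(2,2)], [(1,0),(0,1),(1,1),(0,2)]],
 [[(0,0),(0,1),(1,1),(2,1)], [(1,0),(2,0),(1,1),(1,2)], [(0,1),(1,1),(2,1),(2,2)], [(1,0),(1,1),(0,2),(1,2)]],
 [[(2,0),(0,1),(1,1),(2,1)], [(1,0),(1,1),(1,2),(2,2)], [(0,1),(1,1),(2,1),(0,2)], [(0,0),(1,0),(1,1),(1,2)]]]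

def get_cells_alt (piece_type : Int) (rotation : Int) (x : Int) (y : Int) : List (Int × Int) :=
  match PySem.List.pyGet? OFFSETS piece_type with
  | none => []
  | some rots =>
    match PySem.List.pyGet? rots rotation with
    | none => []
    | some offs => offs.map (fun p => (x + p.1, y + p.2))

-- ===== PRECONDITION & SPEC =====
-- Pre_: exactly the (piece_type, rotation) for which Python's indexing (with negative wraparound)
-- succeeds on the 7x4 table; outside it A raises IndexError.
def Pre_get_cells (piece_type : Int) (rotation : Int) (x : Int) (y : Int) : Prop :=
  -7 ≤ piece_type ∧ piece_type ≤ 6 ∧ -4 ≤ rotation ∧ rotation ≤ 3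
instance (piece_type : Int) (rotation : Int) (x : Int) (y : Int) : Decidable (Pre_get_cells piece_type rotation x y) := by unfold Pre_get_cells; infer_instance
def pvWitness_get_cells : Int × Int × Int × Int := (2, 1, 3, 5)

def Spec_get_cells (piece_type : Int) (rotation : Int) (x : Int) (y : Int) (out : List (Int × Int)) : Prop := out = get_cells_alt piece_type rotation x y
instance (piece_type : Int) (rotation : Int) (x : Int) (y : Int) (out : List (Int × Int)) : Decidable (Spec_get_cells piece_type rotation x y out) := by unfold Spec_get_cells; infer_instance

-- ===== CLAIM (what is proved, stated in full; the proofs are below) =====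
def Claim_equal_get_cells : Prop := ∀ (piece_type : Int) (rotation : Int) (x : Int) (y : Int), Dom_get_cells piece_type rotation x y → Pre_get_cells piece_type rotation x y → Spec_get_cells piece_type rotation x y (get_cells piece_type rotation x y)

-- ===== LEMMAS AND PROOFS =====

-- the (dx, dy) offsets A's 4x4 scan visits for a given shape, in the same dy-major order
def offsetsOf (shape : List (List Int)) : List (Int × Int) :=
  (PySem.List.pyRange 0 4 1).flatMap (fun dy =>
    ((PySem.List.pyRange 0 4 1).filter (fun dx =>
      ((PySem.List.pyGet? shape dy).bind (fun row => PySem.List.pyGet? row dx)) == some 1)).map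
      (fun dx => (dx, dy)))

theorem scan_eq (shape : List (List Int)) (x y : Int) :
    (PySem.List.pyRange 0 4 1).foldl (fun cells dy =>
        (PySem.List.pyRange 0 4 1).foldl (fun cells dx =>
          if ((PySem.List.pyGet? shape dy).bind (fun row => PySem.List.pyGet? row dx)) == some 1
          then cells ++ [(x + dx, y + dy)] else cells) cells) ([] : List (Int × Int))
    = (offsetsOf shape).map (fun p => (x + p.1, y + p.2)) := by
  simp only [PySem.List.foldl_append_if, PySem.List.foldl_append_eq_flatMap, offsetsOf,
    List.map_flatMap, List.map_map, List.nil_append]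
  rfl

theorem bridge (piece_type rotation x y : Int)
    (rots : List (List (List Int))) (shape : List (List Int))
    (rots' : List (List (Int × Int))) (offs : List (Int × Int))
    (hA : PySem.List.pyGet? TETROMINOS piece_type = some rots)
    (hA2 : PySem.List.pyGet? rots rotation = some shape)
    (hB : PySem.List.pyGet? OFFSETS piece_type = some rots')
    (hB2 : PySem.List.pyGet? rots' rotation = some offs)
    (h : offsetsOf shape = offs) :
    get_cells piece_type rotation x y = get_cells_alt piece_type rotation x y := by
  unfold get_cells get_cells_alt
  simp only [hA, hA2, hB, hB2]
  rw [scan_eq, h]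

-- ===== VERDICT (by name: the statement is the Claim_ definition above) =====
theorem get_cells_spec : Claim_equal_get_cells := by
  intro pt rot x y _ hpre
  unfold Spec_get_cells
  obtain ⟨h1, h2, h3, h4⟩ := hpre
  interval_cases pt <;> interval_cases rot <;>
    exact bridge _ _ x y _ _ _ _ rfl rfl rfl rfl (by decide)
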